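-- pv_equiv track=rewrite | github.com/Mr-Bossman/scripts | command_image_grey.py | list_to_discs
-- ===== SOURCE A (Python) =====
-- def grey_bin(bin: str):
-- 	mask = val = int(bin, 2)
-- 	while mask > 0:
-- 		mask >>= 1
-- 		val ^= mask
-- 	return val
--
-- def list_to_discs(frame: list[list[bool]]):
-- 	ret: list[list[int]] = []
-- 	for i in range(len(frame)):
-- 		line_bin = [ 1 if frame[i][j] else 0 for j in range(len(frame[i]))]
-- 		line_4b = [ line_bin[j:j+4] for j in range(0,len(line_bin),4)]
-- 		line_4b_str = [ ''.join(map(str, line_4b[j])) for j in range(len(line_4b))]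
-- 		line_grey = [ grey_bin(line_4b_str[j][::-1]) for j in range(len(line_4b_str))]
-- 		ret.append(line_grey)
-- 	return ret
-- ===== SOURCE B (Python) =====
-- def _gray(g):
-- 	g ^= g >> 1
-- 	g ^= g >> 2
-- 	return g
--
-- def list_to_discs(frame: list[list[bool]]):
-- 	out: list[list[int]] = []
-- 	for row in frame:
-- 		vals: list[int] = []
-- 		g = 0
-- 		w = 1
-- 		for cell in row:
-- 			if cell:
-- 				g += w
-- 			w *= 2
-- 			if w == 16:
-- 				vals.append(_gray(g))
-- 				g = 0
-- 				w = 1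
-- 		if w > 1:
-- 			vals.append(_gray(g))
-- 		out.append(vals)
-- 	return out
-- ===== Notes on version B (the rewrite author's own statement) =====
-- stated objective: faster
-- what changed: Replaces A's four intermediate per-row lists (bit list, 4-slices, joined bit-strings, reversed-string base-2 parse, XOR-shift while loop) by a single pass over each row that accumulates each nibble arithmetically with a doubling weight and gray-decodes it with two closed-form XOR steps.
import Mathlib
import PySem

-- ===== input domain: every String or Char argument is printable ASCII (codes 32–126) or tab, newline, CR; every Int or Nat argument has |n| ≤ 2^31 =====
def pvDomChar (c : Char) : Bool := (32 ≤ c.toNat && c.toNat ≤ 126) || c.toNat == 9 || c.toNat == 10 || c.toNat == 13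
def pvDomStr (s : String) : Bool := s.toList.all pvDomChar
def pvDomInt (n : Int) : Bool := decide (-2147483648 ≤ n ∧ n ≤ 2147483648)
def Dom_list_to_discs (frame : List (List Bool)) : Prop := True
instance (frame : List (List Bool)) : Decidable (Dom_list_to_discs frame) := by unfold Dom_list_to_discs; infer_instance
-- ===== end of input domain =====

-- B replaces A's per-row string pipeline (bit list → 4-slices → bit strings →
-- reversed base-2 parse → XOR-shift while loop) by one arithmetic pass per row.

-- ===== PORT A =====
-- 'while mask > 0: mask >>= 1; val ^= mask', ported with fuel: mask ≥ 0 strictly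
-- decreases under '>> 1' (= floordiv 2), so fuel val.toNat + 1 always suffices.
def greyLoop : Nat → Int → Int → Int
  | 0, _, val => val
  | fuel + 1, mask, val =>
    if 0 < mask then
      let mask' := PySem.Int.floordiv mask 2
      greyLoop fuel mask' (PySem.Int.bxor val mask')
    else val

-- int(bin, 2) raises ValueError on a non-binary string; list_to_discs only ever
-- passes non-empty '0'/'1' strings, so the .getD 0 default is unreachable from it.
def grey_bin (bin : String) : Int :=
  let val := (PySem.Int.ofStrBase? bin 2).getD 0
  greyLoop (val.toNat + 1) val val

def list_to_discs (frame : List (List Bool)) : List (List Int) :=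
  (PySem.List.pyRange 0 (PySem.List.len frame) 1).foldl
    (fun ret i =>
      let fi := PySem.List.pyGetD frame i []   -- frame[i]; i ∈ range(len(frame)) is always in range
      let line_bin := (PySem.List.pyRange 0 (PySem.List.len fi) 1).map
        (fun j => if PySem.List.pyGetD fi j false then (1 : Int) else 0)
      let line_4b := (PySem.List.pyRange 0 (PySem.List.len line_bin) 4).map
        (fun j => PySem.List.slice line_bin (some j) (some (j + 4)))
      let line_4b_str := (PySem.List.pyRange 0 (PySem.List.len line_4b) 1).map
        (fun j => PySem.Str.join "" ((PySem.List.pyGetD line_4b j []).map PySem.Int.toStr))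
      -- s[::-1]; Str.slice? with step -1 never returns none, so .getD "" is unreachable
      let line_grey := (PySem.List.pyRange 0 (PySem.List.len line_4b_str) 1).map
        (fun j => grey_bin ((PySem.Str.slice? (PySem.List.pyGetD line_4b_str j "") none none (-1)).getD ""))
      ret ++ [line_grey]) []

-- ===== PORT B =====
-- 'g ^= g >> 1; g ^= g >> 2' — g ≥ 0 here, so '>> k' is exactly floordiv by 2^k
def grayB (g : Int) : Int :=
  let g1 := PySem.Int.bxor g (PySem.Int.floordiv g 2)
  PySem.Int.bxor g1 (PySem.Int.floordiv g1 4)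

-- Source B's inner for-loop over a row with state (vals, g, w), together with the
-- trailing 'if w > 1' flush at row end
def bLoop : List Bool → List Int → Int → Int → List Int
  | [], vals, g, w => if 1 < w then vals ++ [grayB g] else vals
  | cell :: rest, vals, g, w =>
    let g' := if cell then g + w else g
    let w' := w * 2
    if w' = 16 then bLoop rest (vals ++ [grayB g']) 0 1
    else bLoop rest vals g' w'

def list_to_discs_alt (frame : List (List Bool)) : List (List Int) :=
  frame.map (fun row => bLoop row [] 0 1)

-- ===== PRECONDITION & SPEC =====
def Spec_list_to_discs (frame : List (List Bool)) (out : List (List Int)) : Prop := out = list_to_discs_alt frame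
instance (frame : List (List Bool)) (out : List (List Int)) : Decidable (Spec_list_to_discs frame out) := by unfold Spec_list_to_discs; infer_instance

-- ===== CLAIM (what is proved, stated in full; the proofs are below) =====
def Claim_equal_list_to_discs : Prop := ∀ (frame : List (List Bool)), Dom_list_to_discs frame → Spec_list_to_discs frame (list_to_discs frame)

-- ===== LEMMAS AND PROOFS =====

-- the chunks-of-4 decomposition both row computations produce
def chunks4 {α : Type} : List α → List (List α)
  | [] => []
  | [a] => [[a]]
  | [a, b] => [[a, b]]
  | [a, b, c] => [[a, b, c]]
  | a :: b :: c :: d :: rest => [a, b, c, d] :: chunks4 rest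

def bit (b : Bool) : Int := if b then 1 else 0

-- what A computes for one chunk of a row
def Achunk (c : List Bool) : Int :=
  grey_bin ((PySem.Str.slice? (PySem.Str.join "" ((c.map bit).map PySem.Int.toStr)) none none (-1)).getD "")

-- the four per-row stages of A's loop body (their composite is defeq to the let-chain in list_to_discs)
def stage1 (fi : List Bool) : List Int :=
  (PySem.List.pyRange 0 (PySem.List.len fi) 1).map
    (fun j => if PySem.List.pyGetD fi j false then (1 : Int) else 0)
def stage2 (line_bin : List Int) : List (List Int) :=
  (PySem.List.pyRange 0 (PySem.List.len line_bin) 4).map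
    (fun j => PySem.List.slice line_bin (some j) (some (j + 4)))
def stage3 (line_4b : List (List Int)) : List String :=
  (PySem.List.pyRange 0 (PySem.List.len line_4b) 1).map
    (fun j => PySem.Str.join "" ((PySem.List.pyGetD line_4b j []).map PySem.Int.toStr))
def stage4 (line_4b_str : List String) : List Int :=
  (PySem.List.pyRange 0 (PySem.List.len line_4b_str) 1).map
    (fun j => grey_bin ((PySem.Str.slice? (PySem.List.pyGetD line_4b_str j "") none none (-1)).getD ""))
def rowA (fi : List Bool) : List Int := stage4 (stage3 (stage2 (stage1 fi)))

lemma foldl_append_map {α β : Type} (l : List α) (f : α → β) :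
    ∀ init : List β, l.foldl (fun acc x => acc ++ [f x]) init = init ++ l.map f := by
  induction l with
  | nil => simp
  | cons x xs ih => intro init; simp [List.foldl, ih]

lemma map_idx {α β : Type} (xs : List α) (d : α) (g : α → β) :
    (PySem.List.pyRange 0 (PySem.List.len xs) 1).map (fun j => g (PySem.List.pyGetD xs j d)) = xs.map g := by
  calc (PySem.List.pyRange 0 (PySem.List.len xs) 1).map (fun j => g (PySem.List.pyGetD xs j d))
      = ((PySem.List.pyRange 0 (PySem.List.len xs) 1).map (fun j => PySem.List.pyGetD xs j d)).map g := by
        rw [List.map_map]; rfl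
    _ = xs.map g := by rw [PySem.List.map_pyGetD_pyRange_zero]

lemma pyRange_pos_nil (a b s : Int) (hs : 0 < s) (h : b ≤ a) : PySem.List.pyRange a b s = [] := by
  rw [PySem.List.pyRange_of_pos _ _ hs, if_neg (by omega)]; simp

lemma pyRange_pos_cons (a b s : Int) (hs : 0 < s) (hab : a < b) :
    PySem.List.pyRange a b s = a :: PySem.List.pyRange (a + s) b s := by
  rw [PySem.List.pyRange_of_pos _ _ hs, PySem.List.pyRange_of_pos _ _ hs, if_pos hab]
  have key : (b - a + s - 1) / s = (b - a - 1) / s + 1 := by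
    have h1 : b - a + s - 1 = (b - a - 1) + 1 * s := by ring
    rw [h1, Int.add_mul_ediv_right _ _ (by omega : s ≠ 0)]
  have h0 : 0 ≤ (b - a - 1) / s := Int.ediv_nonneg (by omega) (by omega)
  have hcount : ((b - a + s - 1) / s).toNat
      = (if a + s < b then ((b - (a + s) + s - 1) / s).toNat else 0) + 1 := by
    split
    · have h2 : b - (a + s) + s - 1 = b - a - 1 := by ring
      rw [h2, key]; omega
    · have hz : (b - a - 1) / s = 0 :=
        Int.ediv_eq_zero_of_lt (by omega) (by omega)
      rw [key, hz]; omega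
  rw [hcount, List.range_succ_eq_map]
  simp only [List.map_cons, List.map_map, Nat.cast_zero, mul_zero, add_zero]
  congr 1
  apply List.map_congr_left
  intro k _
  simp only [Function.comp]
  push_cast
  ring

lemma slice4 {α : Type} (xs : List α) (j : Nat) :
    PySem.List.slice xs (some (j : Int)) (some ((j : Int) + 4)) = (xs.drop j).take 4 := by
  have h := PySem.List.slice_natCast_add xs j 4
  norm_num at h
  exact h

lemma slice_chunks_aux {α : Type} (ys full : List α) (off : Nat) (hoff : full.drop off = ys) :
    (PySem.List.pyRange (off : Int) ((full.length : Int)) 4).map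
      (fun j => PySem.List.slice full (some j) (some (j + 4))) = chunks4 ys := by
  induction ys using chunks4.induct generalizing off with
  | case1 =>
    have hlen : full.length ≤ off := by
      by_contra h
      have := List.drop_eq_nil_iff.mp hoff
      omega
    rw [pyRange_pos_nil _ _ _ (by norm_num) (by exact_mod_cast hlen)]
    rfl
  | case2 a =>
    have hlen : full.length = off + 1 := by
      have := congrArg List.length hoff; simp at this; omega
    rw [pyRange_pos_cons _ _ _ (by norm_num) (by exact_mod_cast (by omega : off < full.length)),
        pyRange_pos_nil _ _ _ (by norm_num) (by exact_mod_cast (by omega : (full.length : Int) ≤ (off : Int) + 4))]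
    simp only [List.map_cons, List.map_nil, slice4, hoff]
    rfl
  | case3 a b =>
    have hlen : full.length = off + 2 := by
      have := congrArg List.length hoff; simp at this; omega
    rw [pyRange_pos_cons _ _ _ (by norm_num) (by exact_mod_cast (by omega : off < full.length)),
        pyRange_pos_nil _ _ _ (by norm_num) (by exact_mod_cast (by omega : (full.length : Int) ≤ (off : Int) + 4))]
    simp only [List.map_cons, List.map_nil, slice4, hoff]
    rfl
  | case4 a b c =>
    have hlen : full.length = off + 3 := by
      have := congrArg List.length hoff; simp at this; omega
    rw [pyRange_pos_cons _ _ _ (by norm_num) (by exact_mod_cast (by omega : off < full.length)),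
        pyRange_pos_nil _ _ _ (by norm_num) (by exact_mod_cast (by omega : (full.length : Int) ≤ (off : Int) + 4))]
    simp only [List.map_cons, List.map_nil, slice4, hoff]
    rfl
  | case5 a b c d rest ih =>
    have hlen : off + 4 ≤ full.length := by
      have := congrArg List.length hoff; simp at this; omega
    have h2 : full.drop (off + 4) = rest := by
      have h3 : full.drop (off + 4) = (full.drop off).drop 4 := by
        rw [List.drop_drop]
      rw [h3, hoff]; rfl
    rw [pyRange_pos_cons _ _ _ (by norm_num) (by exact_mod_cast (by omega : off < full.length))]
    simp only [List.map_cons, chunks4]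
    congr 1
    · rw [slice4, hoff]; rfl
    · have hcast : (off : Int) + 4 = ((off + 4 : Nat) : Int) := by push_cast; ring
      rw [hcast, ih (off + 4) h2]

lemma slice_chunks {α : Type} (ys : List α) :
    (PySem.List.pyRange 0 ((ys.length : Int)) 4).map
      (fun j => PySem.List.slice ys (some j) (some (j + 4))) = chunks4 ys := by
  have h := slice_chunks_aux ys ys 0 rfl
  simpa using h

lemma chunks4_map_bit (row : List Bool) :
    chunks4 (row.map bit) = (chunks4 row).map (List.map bit) := by
  induction row using chunks4.induct <;> simp_all [chunks4]

lemma stage1_eq (fi : List Bool) : stage1 fi = fi.map bit :=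
  map_idx fi false bit

lemma stage2_eq (ys : List Int) : stage2 ys = chunks4 ys := by
  unfold stage2
  rw [show PySem.List.len ys = ((ys.length : Int)) from PySem.List.len_eq _]
  exact slice_chunks ys

lemma stage3_eq (ys : List (List Int)) :
    stage3 ys = ys.map (fun c => PySem.Str.join "" (c.map PySem.Int.toStr)) :=
  map_idx ys [] (fun c => PySem.Str.join "" (c.map PySem.Int.toStr))

lemma stage4_eq (ys : List String) :
    stage4 ys = ys.map (fun s => grey_bin ((PySem.Str.slice? s none none (-1)).getD "")) :=
  map_idx ys "" (fun s => grey_bin ((PySem.Str.slice? s none none (-1)).getD ""))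

lemma rowA_chunks (row : List Bool) : rowA row = (chunks4 row).map Achunk := by
  unfold rowA
  rw [stage1_eq, stage2_eq, stage3_eq, stage4_eq, chunks4_map_bit]
  simp only [List.map_map]
  apply List.map_congr_left
  intro c _
  simp only [Function.comp]
  rfl

lemma bLoop_prefix (rest : List Bool) :
    ∀ vals g w, bLoop rest vals g w = vals ++ bLoop rest [] g w := by
  induction rest with
  | nil => intro vals g w; simp only [bLoop]; split <;> simp
  | cons a t ih =>
    intro vals g w
    simp only [bLoop]
    split
    · rw [ih (vals ++ _), ih ([] ++ _)]; try simp
    · rw [ih vals, ih []]; try simp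

lemma bLoop_chunks (row : List Bool) : bLoop row [] 0 1 = (chunks4 row).map Achunk := by
  induction row using chunks4.induct with
  | case1 => rfl
  | case2 a => cases a <;> decide
  | case3 a b => cases a <;> cases b <;> decide
  | case4 a b c => cases a <;> cases b <;> cases c <;> decide
  | case5 a b c d rest ih =>
    show bLoop (a :: b :: c :: d :: rest) [] 0 1 = Achunk [a, b, c, d] :: (chunks4 rest).map Achunk
    cases a <;> cases b <;> cases c <;> cases d <;>
      (norm_num [bLoop]; rw [bLoop_prefix, ih]
       simp only [List.singleton_append, List.cons.injEq]
       exact ⟨by decide, trivial⟩)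

-- ===== VERDICT (by name: the statement is the Claim_ definition above) =====
theorem list_to_discs_spec : Claim_equal_list_to_discs := by
  intro frame _
  show list_to_discs frame = list_to_discs_alt frame
  unfold list_to_discs list_to_discs_alt
  change (PySem.List.pyRange 0 (PySem.List.len frame) 1).foldl
      (fun acc j => (fun ret fi => ret ++ [rowA fi]) acc (PySem.List.pyGetD frame j [])) [] = _
  rw [PySem.List.foldl_pyRange_zero_pyGetD frame [] (fun ret fi => ret ++ [rowA fi]) []]
  rw [foldl_append_map frame rowA []]
  simp only [List.nil_append]
  apply List.map_congr_left
  intro row _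
  rw [rowA_chunks, bLoop_chunks]
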